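-- pv_equiv track=rewrite | github.com/anshulshacks/google-foobar | bomb-baby/solution.py | solve
-- ===== SOURCE A (Python) =====
-- def solve(bomb, gen):
--     while bomb[0] > 0 and bomb[1] > 0 and bomb[0] != bomb[1]:
--         if (bomb[0] > bomb[1]):
--             max = bomb[0]
--             min = bomb[1]
--         else:
--             max = bomb[1]
--             min = bomb[0]
--         if ((max - min) % min == 0 and min != 1):
--                 return 0
--         if ((max - min) % min == 0 and min == 1):
--             return gen + max - 1
--         else:
--             multiplier = (max - min) // min + 1
--             return solve([max - (min * multiplier), min], gen + multiplier)
--     return 0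
-- ===== SOURCE B (Python) =====
-- def solve(bomb, gen):
--     # Iterative Euclid with divmod; same return values as the recursive
--     # subtract-and-recurse original (return value only; no mutation).
--     if bomb[0] <= 0 or bomb[1] <= 0 or bomb[0] == bomb[1]:
--         return 0
--     x, y = max(bomb[0], bomb[1]), min(bomb[0], bomb[1])
--     steps = gen
--     while True:
--         q, r = divmod(x, y)
--         if r == 0:
--             return steps + x - 1 if y == 1 else 0
--         steps += q
--         x, y = y, r
-- ===== Notes on version B (the rewrite author's own statement) =====
-- stated objective: simpler
-- what changed: A's tail recursion that rebuilds a fresh 2-element list and re-derives the quotient from (max-min)//min+1 each call is replaced by a plain iterative Euclid loop over two scalars using one divmod per step.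
import Mathlib
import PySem

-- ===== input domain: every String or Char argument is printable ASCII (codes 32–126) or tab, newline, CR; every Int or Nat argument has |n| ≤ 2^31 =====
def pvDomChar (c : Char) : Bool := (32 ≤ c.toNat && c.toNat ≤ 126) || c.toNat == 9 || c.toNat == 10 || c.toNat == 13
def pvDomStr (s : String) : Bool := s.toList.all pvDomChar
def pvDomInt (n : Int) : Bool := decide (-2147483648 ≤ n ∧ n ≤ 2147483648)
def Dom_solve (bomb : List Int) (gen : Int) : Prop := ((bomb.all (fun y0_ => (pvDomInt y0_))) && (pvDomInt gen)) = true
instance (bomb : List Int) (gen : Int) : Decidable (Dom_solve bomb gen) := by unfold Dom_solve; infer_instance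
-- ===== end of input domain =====

-- B replaces A's tail recursion (which rebuilds a fresh 2-element list each call) by an
-- iterative Euclid loop over two scalars using one divmod per step; return value only.

-- termination helper for both ports (cited by decreasing_by)
theorem pvModNatAbsLt (x y : Int) (hy : y ≠ 0) : (PySem.Int.mod x y).natAbs < y.natAbs := by
  rcases lt_or_gt_of_ne hy with hneg | hpos
  · have h1 : PySem.Int.mod (-x) (-y) = -PySem.Int.mod x y := PySem.Int.mod_neg_neg x y
    have h2 : PySem.Int.mod (-x) (-y) = (-x) % (-y) := PySem.Int.mod_eq_emod_of_pos (by omega)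
    have h3 : 0 ≤ (-x) % (-y) := Int.emod_nonneg _ (by omega)
    have h4 : (-x) % (-y) < -y := Int.emod_lt_of_pos _ (by omega)
    omega
  · have h2 : PySem.Int.mod x y = x % y := PySem.Int.mod_eq_emod_of_pos hpos
    have h3 : 0 ≤ x % y := Int.emod_nonneg _ (by omega)
    have h4 : x % y < y := Int.emod_lt_of_pos _ hpos
    omega

-- the Euclid step of A stays positive and shrinks (cited by decreasing_by)
theorem pvStepBounds (mx mn : Int) (hmn : 0 < mn) (hlt : mn < mx)
    (hnd : PySem.Int.mod (mx - mn) mn ≠ 0) :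
    0 < mx - mn * (PySem.Int.floordiv (mx - mn) mn + 1) ∧
      mx - mn * (PySem.Int.floordiv (mx - mn) mn + 1) < mn := by
  have hq : PySem.Int.floordiv (mx - mn) mn * mn + PySem.Int.mod (mx - mn) mn = mx - mn :=
    PySem.Int.floordiv_mul_add_mod _ _
  have hm : PySem.Int.mod (mx - mn) mn = (mx - mn) % mn := PySem.Int.mod_eq_emod_of_pos hmn
  have h3 : 0 ≤ (mx - mn) % mn := Int.emod_nonneg _ (by omega)
  have h4 : (mx - mn) % mn < mn := Int.emod_lt_of_pos _ hmn
  have he : mx - mn * (PySem.Int.floordiv (mx - mn) mn + 1) = (mx - mn) % mn := by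
    have hcm : mn * PySem.Int.floordiv (mx - mn) mn = PySem.Int.floordiv (mx - mn) mn * mn :=
      mul_comm _ _
    linarith [hq, hm, hcm]
  omega

-- ===== PORT A =====
def solve (bomb : List Int) (gen : Int) : Int :=
  match h0 : PySem.List.pyGet? bomb 0 with
  | none => 0          -- IndexError: outside Pre_solve
  | some b0 =>
    if hb0 : b0 > 0 then
      match h1 : PySem.List.pyGet? bomb 1 with
      | none => 0      -- IndexError: outside Pre_solve
      | some b1 =>
        if hg : b1 > 0 ∧ b0 ≠ b1 then
          let mx : Int := if b0 > b1 then b0 else b1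
          let mn : Int := if b0 > b1 then b1 else b0
          if PySem.Int.mod (mx - mn) mn = 0 ∧ mn ≠ 1 then 0
          else if PySem.Int.mod (mx - mn) mn = 0 ∧ mn = 1 then gen + mx - 1
          else
            let multiplier := PySem.Int.floordiv (mx - mn) mn + 1
            solve [mx - mn * multiplier, mn] (gen + multiplier)
        else 0
    else 0
termination_by ((PySem.List.pyGet? bomb 0).getD 0 + (PySem.List.pyGet? bomb 1).getD 0).toNat
decreasing_by
  rename_i hA hB
  have hg1 := hg.1
  have hg2 := hg.2
  have hnd : PySem.Int.mod (mx - mn) mn ≠ 0 := by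
    intro h
    by_cases h1 : mn = 1
    · exact hB ⟨h, h1⟩
    · exact hA ⟨h, h1⟩
  rw [h0, h1]
  by_cases hc : b0 > b1
  · have hmx : mx = b0 := dif_pos hc
    have hmn : mn = b1 := dif_pos hc
    rw [hmx, hmn] at hnd
    have hb := pvStepBounds b0 b1 (by omega) (by omega) hnd
    simp only [dif_pos hc, PySem.List.pyGet?, PySem.List.pyIdx?, List.length_cons,
      List.length_nil]
    norm_num
    omega
  · have hmx : mx = b1 := dif_neg hc
    have hmn : mn = b0 := dif_neg hc
    rw [hmx, hmn] at hnd
    have hb := pvStepBounds b1 b0 (by omega) (by omega) hnd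
    simp only [dif_neg hc, PySem.List.pyGet?, PySem.List.pyIdx?, List.length_cons,
      List.length_nil]
    norm_num
    omega

-- ===== PORT B =====
-- helper: the 'while True' loop of Source B (state x, y, steps)
def solveLoop (x y steps : Int) : Int :=
  match hdm : PySem.Int.divmod? x y with
  | none => 0          -- ZeroDivisionError: unreachable from solve_alt's guard
  | some (q, r) =>
    if r = 0 then (if y = 1 then steps + x - 1 else 0)
    else solveLoop y r (steps + q)
termination_by y.natAbs
decreasing_by
  simp only [PySem.Int.divmod?] at hdm
  split at hdm
  · exact absurd hdm (by simp)
  · rename_i hy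
    obtain ⟨hq, hr⟩ := Prod.mk.injEq .. ▸ Option.some.inj hdm
    have hmf : PySem.Int.mod x y = x.fmod y := rfl
    have := pvModNatAbsLt x y hy
    omega

def solve_alt (bomb : List Int) (gen : Int) : Int :=
  match PySem.List.pyGet? bomb 0 with
  | none => 0          -- IndexError: outside Pre_solve
  | some b0 =>
    if b0 ≤ 0 then 0
    else
      match PySem.List.pyGet? bomb 1 with
      | none => 0      -- IndexError: outside Pre_solve
      | some b1 =>
        if b1 ≤ 0 ∨ b0 = b1 then 0
        else solveLoop (max b0 b1) (min b0 b1) gen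

-- ===== PRECONDITION & SPEC =====
-- Pre_ excludes only the inputs where A raises IndexError: the empty list, and a
-- one-element list whose sole element is positive (the guard then reads bomb[1]).
def Pre_solve (bomb : List Int) (gen : Int) : Prop :=
  bomb ≠ [] ∧ (bomb.headI ≤ 0 ∨ 2 ≤ bomb.length)
instance (bomb : List Int) (gen : Int) : Decidable (Pre_solve bomb gen) := by
  unfold Pre_solve; infer_instance
def pvWitness_solve : List Int × Int := ([4, 7], 1)

def Spec_solve (bomb : List Int) (gen : Int) (out : Int) : Prop := out = solve_alt bomb gen
instance (bomb : List Int) (gen : Int) (out : Int) : Decidable (Spec_solve bomb gen out) := by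
  unfold Spec_solve; infer_instance

-- ===== CLAIM (what is proved, stated in full; the proofs are below) =====
def Claim_equal_solve : Prop := ∀ (bomb : List Int) (gen : Int), Dom_solve bomb gen → Pre_solve bomb gen → Spec_solve bomb gen (solve bomb gen)

-- ===== LEMMAS AND PROOFS =====

theorem pvGet2_0 (a b : Int) : PySem.List.pyGet? [a, b] 0 = some a := by
  simp [PySem.List.pyGet?, PySem.List.pyIdx?]

theorem pvGet2_1 (a b : Int) : PySem.List.pyGet? [a, b] 1 = some b := by
  simp [PySem.List.pyGet?, PySem.List.pyIdx?]

-- one unguarded unfolding of A's recursion, with both list reads resolved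
theorem solve_unfold (bomb : List Int) (gen b0 b1 : Int)
    (h0 : PySem.List.pyGet? bomb 0 = some b0) (h1 : PySem.List.pyGet? bomb 1 = some b1) :
    solve bomb gen =
      if b0 > 0 then
        if b1 > 0 ∧ b0 ≠ b1 then
          (let mx : Int := if b0 > b1 then b0 else b1
           let mn : Int := if b0 > b1 then b1 else b0
           if PySem.Int.mod (mx - mn) mn = 0 ∧ mn ≠ 1 then 0
           else if PySem.Int.mod (mx - mn) mn = 0 ∧ mn = 1 then gen + mx - 1
           else solve [mx - mn * (PySem.Int.floordiv (mx - mn) mn + 1), mn]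
                  (gen + (PySem.Int.floordiv (mx - mn) mn + 1)))
        else 0
      else 0 := by
  rw [solve.eq_def]
  split
  · rename_i heq; rw [heq] at h0; cases h0
  · rename_i b0' heq
    rw [heq] at h0
    injection h0 with h0
    subst h0
    by_cases hb : b0' > 0
    · rw [dif_pos hb, if_pos hb]
      split
      · rename_i heq1; rw [heq1] at h1; cases h1
      · rename_i b1' heq1
        rw [heq1] at h1; injection h1 with h1; subst h1
        by_cases hgc : b1' > 0 ∧ b0' ≠ b1'
        · rw [dif_pos hgc, if_pos hgc]
        · rw [dif_neg hgc, if_neg hgc]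
    · rw [dif_neg hb, if_neg hb]

-- A returns 0 immediately when the first element is nonpositive
theorem solve_unfold' (bomb : List Int) (gen b0 : Int)
    (h0 : PySem.List.pyGet? bomb 0 = some b0) (hle : ¬ b0 > 0) :
    solve bomb gen = 0 := by
  rw [solve.eq_def]
  split
  · rfl
  · rename_i b0' heq
    rw [heq] at h0
    injection h0 with h0
    subst h0
    rw [dif_neg hle]

-- A's branch body on an ordered pair mn < mx equals one iteration of B's loop
theorem pvPairEq (n : Nat)
    (ih : ∀ (bomb : List Int) (gen x y : Int),
        PySem.List.pyGet? bomb 0 = some x → PySem.List.pyGet? bomb 1 = some y →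
        0 < x → 0 < y → x ≠ y → (x + y).toNat ≤ n →
        solve bomb gen = solveLoop (max x y) (min x y) gen)
    (mx mn gen : Int) (hmn : 0 < mn) (hlt : mn < mx) (hb : (mx + mn).toNat ≤ n + 1) :
    (if PySem.Int.mod (mx - mn) mn = 0 ∧ mn ≠ 1 then (0 : Int)
     else if PySem.Int.mod (mx - mn) mn = 0 ∧ mn = 1 then gen + mx - 1
     else solve [mx - mn * (PySem.Int.floordiv (mx - mn) mn + 1), mn]
            (gen + (PySem.Int.floordiv (mx - mn) mn + 1)))
    = solveLoop mx mn gen := by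
  have hmodsub : PySem.Int.mod (mx - mn) mn = PySem.Int.mod mx mn := by
    rw [PySem.Int.mod_eq_emod_of_pos hmn, PySem.Int.mod_eq_emod_of_pos hmn]
    have h : mx - mn = mx + mn * (-1) := by ring
    rw [h, Int.add_mul_emod_self_left]
  have hdivsub : PySem.Int.floordiv (mx - mn) mn + 1 = PySem.Int.floordiv mx mn := by
    rw [PySem.Int.floordiv_eq_ediv_of_pos hmn, PySem.Int.floordiv_eq_ediv_of_pos hmn]
    have h : mx - mn = mx + mn * (-1) := by ring
    rw [h, Int.add_mul_ediv_left _ _ (by omega : mn ≠ 0)]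
    ring
  have hmf : PySem.Int.mod mx mn = Int.fmod mx mn := rfl
  have hdf : PySem.Int.floordiv mx mn = Int.fdiv mx mn := rfl
  have hL : solveLoop mx mn gen =
      if Int.fmod mx mn = 0 then (if mn = 1 then gen + mx - 1 else 0)
      else solveLoop mn (Int.fmod mx mn) (gen + Int.fdiv mx mn) := by
    rw [solveLoop.eq_def]
    have hdm : PySem.Int.divmod? mx mn = some (Int.fdiv mx mn, Int.fmod mx mn) := by
      unfold PySem.Int.divmod?
      rw [if_neg (by omega : ¬ mn = 0)]
    split
    · rename_i heq; rw [hdm] at heq; cases heq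
    · rename_i q r heq
      rw [hdm] at heq
      injection heq with heq
      have hq : q = Int.fdiv mx mn := (congrArg Prod.fst heq).symm
      have hr : r = Int.fmod mx mn := (congrArg Prod.snd heq).symm
      rw [hq, hr]
  rw [hL]
  by_cases hz : PySem.Int.mod (mx - mn) mn = 0
  · have hf0 : Int.fmod mx mn = 0 := by rw [← hmf, ← hmodsub]; exact hz
    rw [if_pos hf0]
    by_cases h1 : mn = 1
    · rw [if_neg (by tauto), if_pos ⟨hz, h1⟩, if_pos h1]
    · rw [if_pos ⟨hz, h1⟩, if_neg h1]
  · have hfne : ¬ Int.fmod mx mn = 0 := by rw [← hmf, ← hmodsub]; exact hz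
    rw [if_neg hfne, if_neg (by tauto), if_neg (by tauto)]
    have hre : PySem.Int.mod mx mn = mx % mn := PySem.Int.mod_eq_emod_of_pos hmn
    have hrm : PySem.Int.mod mx mn = Int.fmod mx mn := hmf
    have hquot : PySem.Int.floordiv (mx - mn) mn * mn + PySem.Int.mod (mx - mn) mn
        = mx - mn := PySem.Int.floordiv_mul_add_mod _ _
    have hrew : mx - mn * (PySem.Int.floordiv (mx - mn) mn + 1) = Int.fmod mx mn := by
      have hcm : mn * PySem.Int.floordiv (mx - mn) mn
          = PySem.Int.floordiv (mx - mn) mn * mn := mul_comm _ _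
      linarith [hmodsub, hrm]
    have hrpos : 0 < Int.fmod mx mn := by
      have h3 : 0 ≤ mx % mn := Int.emod_nonneg _ (by omega)
      omega
    have hrlt : Int.fmod mx mn < mn := by
      have h4 : mx % mn < mn := Int.emod_lt_of_pos _ hmn
      omega
    rw [hrew, hdivsub, hdf]
    have hind := ih [Int.fmod mx mn, mn] (gen + Int.fdiv mx mn) (Int.fmod mx mn) mn
      (pvGet2_0 _ _) (pvGet2_1 _ _) hrpos hmn (by omega) (by omega)
    rw [hind, max_eq_right (le_of_lt hrlt), min_eq_left (le_of_lt hrlt)]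

theorem pvLoopEq (n : Nat) : ∀ (bomb : List Int) (gen x y : Int),
    PySem.List.pyGet? bomb 0 = some x → PySem.List.pyGet? bomb 1 = some y →
    0 < x → 0 < y → x ≠ y → (x + y).toNat ≤ n →
    solve bomb gen = solveLoop (max x y) (min x y) gen := by
  induction n with
  | zero => intro bomb gen x y h0 h1 hx hy hne hb; omega
  | succ n ih =>
    intro bomb gen x y h0 h1 hx hy hne hb
    rw [solve_unfold bomb gen x y h0 h1, if_pos hx, if_pos ⟨hy, hne⟩]
    by_cases hc : x > y
    · simp only [if_pos hc]
      rw [max_eq_left (le_of_lt hc), min_eq_right (le_of_lt hc)]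
      exact pvPairEq n ih x y gen hy hc (by omega)
    · have hc' : y > x := by omega
      simp only [if_neg hc]
      rw [max_eq_right (le_of_lt hc'), min_eq_left (le_of_lt hc')]
      exact pvPairEq n ih y x gen hx hc' (by omega)

-- ===== VERDICT (by name: the statement is the Claim_ definition above) =====
theorem solve_spec : Claim_equal_solve := by
  intro bomb gen hdom hpre
  unfold Spec_solve
  obtain ⟨hne, hor⟩ := hpre
  cases bomb with
  | nil => exact absurd rfl hne
  | cons b0 rest =>
    have h0 : PySem.List.pyGet? (b0 :: rest) 0 = some b0 := by
      simp [PySem.List.pyGet?, PySem.List.pyIdx?]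
    by_cases hb0 : b0 > 0
    · have hlen : 2 ≤ (b0 :: rest).length := by
        rcases hor with h | h
        · simp only [List.headI] at h; omega
        · exact h
      cases rest with
      | nil => simp at hlen
      | cons b1 rest' =>
        have h1 : PySem.List.pyGet? (b0 :: b1 :: rest') 1 = some b1 := by
          simp [PySem.List.pyGet?, PySem.List.pyIdx?]
        by_cases hg : b1 > 0 ∧ b0 ≠ b1
        · rw [pvLoopEq ((b0 + b1).toNat) (b0 :: b1 :: rest') gen b0 b1 h0 h1 hb0 hg.1 hg.2
            (le_refl _)]
          simp only [solve_alt, h0, h1]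
          rw [if_neg (by omega : ¬ b0 ≤ 0),
            if_neg (show ¬ (b1 ≤ 0 ∨ b0 = b1) by
              simp only [not_or]
              exact ⟨by omega, hg.2⟩)]
        · rw [solve_unfold _ gen b0 b1 h0 h1, if_pos hb0, if_neg hg]
          simp only [solve_alt, h0, h1]
          by_cases hle : b0 ≤ 0
          · rw [if_pos hle]
          · rw [if_neg hle, if_pos (by omega)]
    · rw [solve_unfold' (b0 :: rest) gen b0 h0 (by omega)]
      simp only [solve_alt, h0]
      rw [if_pos (by omega : b0 ≤ 0)]
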